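-- pv_equiv track=rewrite | github.com/zhenfelix/OnlineJudgeCodings | LeetCode/力扣杯/5817. Check If a String is Decomposble to Value-Equal Substrings.py | isDecomposable
-- ===== SOURCE A (Python) =====
-- def isDecomposable(s: str) -> bool:
--     # if len(s) < 5:
--     #     return False
--     s += '$'
--     flag = False
--     cnt = 1
--     for a, b in zip(s,s[1:]):
--         if a == b:
--             cnt += 1
--         else:
--             if cnt%3 == 2:
--                 if flag:
--                     return False
--                 else:
--                     flag = True
--             elif cnt%3 != 0:
--                 return False
--             cnt = 1
--     return flag
-- ===== SOURCE B (Python) =====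
-- def isDecomposable(s: str) -> bool:
--     # Two-phase: build the list of maximal run lengths, then aggregate-check it.
--     runs = []
--     prev = None
--     n = 0
--     for ch in s:
--         if ch == prev:
--             n += 1
--         else:
--             if n:
--                 runs.append(n)
--             prev = ch
--             n = 1
--     if n:
--         runs.append(n)
--     if any(r % 3 == 1 for r in runs):
--         return False
--     return sum(r % 3 == 2 for r in runs) == 1
-- ===== Notes on version B (the rewrite author's own statement) =====
-- stated objective: alternative
-- what changed: B replaces A's fused sentinel-terminated scan (running count, flag, early returns) by two phases: first build the full list of maximal run lengths, then aggregate-check it (reject any run with length %3==1, accept iff exactly one run has length %3==2); the '$' sentinel and the in-loop flag state machine are gone.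
-- intended difference: On strings ending in '$' (A's sentinel character) whose run structure makes the final run's length matter, A's appended sentinel merges with the final run so A effectively ignores the last run entirely and returns the wrong decomposability verdict (e.g. A('aa$') = True), while B correctly counts the trailing run ('aa$' has a run of length 1, so B returns False), which is the intended value for run-length decomposition. — e.g. on isDecomposable("aa$"): A returns true, B returns false
import Mathlib
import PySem

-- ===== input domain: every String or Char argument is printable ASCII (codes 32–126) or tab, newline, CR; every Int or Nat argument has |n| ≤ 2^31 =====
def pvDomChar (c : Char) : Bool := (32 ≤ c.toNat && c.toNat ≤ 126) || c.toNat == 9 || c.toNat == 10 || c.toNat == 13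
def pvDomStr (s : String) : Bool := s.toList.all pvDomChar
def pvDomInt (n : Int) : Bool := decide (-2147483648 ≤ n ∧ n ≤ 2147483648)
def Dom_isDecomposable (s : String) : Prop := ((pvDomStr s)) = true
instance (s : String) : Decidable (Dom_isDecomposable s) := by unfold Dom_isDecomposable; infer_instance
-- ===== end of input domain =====

-- B builds the run-length list first and aggregates afterwards instead of A's fused sentinel scan;
-- on strings ending in A's sentinel '$' A ignores the final run, B counts it (see D_ below).

-- ===== PORT A =====
def aLoop : Bool → Nat → List (Char × Char) → Bool
  | flag, _, [] => flag
  | flag, cnt, (a, b) :: rest =>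
    if a == b then aLoop flag (cnt + 1) rest
    else if cnt % 3 == 2 then
      (if flag then false else aLoop true 1 rest)
    else if cnt % 3 != 0 then false
    else aLoop flag 1 rest

def isDecomposable (s : String) : Bool :=
  let t := s.toList ++ ['$']
  aLoop false 1 (t.zip (t.drop 1))

-- ===== PORT B =====
def bBuild : Option Char → Nat → List Nat → List Char → List Nat
  | _, n, runs, [] => if n != 0 then runs ++ [n] else runs
  | prev, n, runs, ch :: rest =>
    if prev == some ch then bBuild prev (n + 1) runs rest
    else bBuild (some ch) 1 (if n != 0 then runs ++ [n] else runs) rest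

def isDecomposable_alt (s : String) : Bool :=
  let runs := bBuild none 0 [] s.toList
  if runs.any (fun r => r % 3 == 1) then false
  else runs.countP (fun r => r % 3 == 2) == 1

-- ===== PRECONDITION & SPEC =====
-- run lengths of the input, via the library splitBy (independent of both ports)
def runsD (s : String) : List Nat := (s.toList.splitBy (· == ·)).map (·.length % 3)

-- On strings ending in '$' whose run structure makes the last run decisive, A's appended sentinel
-- merges with the final run so A ignores it and returns the wrong verdict (e.g. A "aa$" = true),
-- while B counts the trailing run (B "aa$" = false), the intended value.
def D_isDecomposable (s : String) : Prop :=
  let l := runsD s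
  s.toList.getLast? = some '$' ∧
  1 ≤ l.getLastD 0 ∧ l.getLastD 0 + l.count 1 = 2 ∧ 1 ≤ l.count 2 ∧ l.count 2 ≤ l.getLastD 0

instance (s : String) : Decidable (D_isDecomposable s) := by unfold D_isDecomposable; infer_instance

def Spec_isDecomposable (s : String) (out : Bool) : Prop := ¬ D_isDecomposable s → out = isDecomposable_alt s
instance (s : String) (out : Bool) : Decidable (Spec_isDecomposable s out) := by unfold Spec_isDecomposable; infer_instance

def pvDiffWitness_isDecomposable : String := "aa$"
def pvDiffWitnessOut_isDecomposable : Bool × Bool := (true, false)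

-- ===== CLAIM (what is proved, stated in full; the proofs are below) =====
def Claim_unchanged_isDecomposable : Prop := ∀ (s : String), Dom_isDecomposable s → Spec_isDecomposable s (isDecomposable s)
def Claim_changed_isDecomposable : Prop := Dom_isDecomposable (pvDiffWitness_isDecomposable) ∧ D_isDecomposable (pvDiffWitness_isDecomposable) ∧ isDecomposable (pvDiffWitness_isDecomposable) = pvDiffWitnessOut_isDecomposable.1 ∧ isDecomposable_alt (pvDiffWitness_isDecomposable) = pvDiffWitnessOut_isDecomposable.2 ∧ pvDiffWitnessOut_isDecomposable.1 ≠ pvDiffWitnessOut_isDecomposable.2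
def Claim_exact_isDecomposable : Prop := ∀ (s : String), Dom_isDecomposable s → D_isDecomposable s → isDecomposable s ≠ isDecomposable_alt s

-- ===== LEMMAS AND PROOFS =====

-- canonical run-length recursion used only by the proofs
def runsR : Char → Nat → List Char → List Nat
  | _, n, [] => [n]
  | c, n, d :: rest => if d == c then runsR c (n + 1) rest else n :: runsR d 1 rest

-- the run-list check A's loop performs at each run boundary
def check : Bool → List Nat → Bool
  | flag, [] => flag
  | flag, r :: rest =>
    if r % 3 == 2 then (if flag then false else check true rest)
    else if r % 3 != 0 then false
    else check flag rest

-- A's loop never checks the final run (no boundary after it)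
def chk (flag : Bool) (rs : List Nat) : Bool := check flag rs.dropLast

theorem runsR_ne_nil (c : Char) (n : Nat) (cs : List Char) : runsR c n cs ≠ [] := by
  cases cs with
  | nil => simp [runsR]
  | cons d rest => simp only [runsR]; split <;> simp [runsR_ne_nil]

theorem chk_cons_cons (flag : Bool) (r y : Nat) (t : List Nat) :
    chk flag (r :: y :: t) =
      (if r % 3 == 2 then (if flag then false else chk true (y :: t))
       else if r % 3 != 0 then false
       else chk flag (y :: t)) := by
  simp [chk, check]

theorem aLoop_eq_chk (cs : List Char) (c : Char) (flag : Bool) (n : Nat) :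
    aLoop flag n ((c :: cs).zip cs) = chk flag (runsR c n cs) := by
  induction cs generalizing c flag n with
  | nil => simp [aLoop, chk, check, runsR]
  | cons d rest ih =>
    simp only [List.zip_cons_cons, aLoop, runsR]
    by_cases h : c = d
    · subst h; simp [ih]
    · have hb : (c == d) = false := by simp [h]
      have hb' : (d == c) = false := by simp [Ne.symm h]
      rw [hb, hb']
      obtain ⟨y, t, hy⟩ : ∃ y t, runsR d 1 rest = y :: t := by
        cases hr : runsR d 1 rest with
        | nil => exact absurd hr (runsR_ne_nil d 1 rest)
        | cons y t => exact ⟨y, t, rfl⟩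
      simp only [Bool.false_eq_true, if_false]
      rw [hy, chk_cons_cons, ← hy]
      simp only [ih]

theorem chk_concat (flag : Bool) (rs : List Nat) (x : Nat) :
    chk flag (rs ++ [x]) = check flag rs := by
  simp [chk]

-- appending the sentinel: merges if the last char is '$', otherwise adds a run of length 1
theorem runsR_sentinel (cs : List Char) (c : Char) (n : Nat) :
    runsR c n (cs ++ ['$']) =
      (if (c :: cs).getLast (by simp) = '$'
       then (runsR c n cs).dropLast ++ [(runsR c n cs).getLastD 0 + 1]
       else runsR c n cs ++ [1]) := by
  induction cs generalizing c n with
  | nil =>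
    simp only [List.nil_append, runsR, List.getLast_singleton]
    by_cases h : c = '$'
    · subst h; simp [runsR]
    · have : ('$' == c) = false := by simp [Ne.symm h]
      simp [this, h]
  | cons d rest ih =>
    have hl : (c :: d :: rest).getLast (by simp) = (d :: rest).getLast (by simp) := by
      simp [List.getLast_cons]
    simp only [List.cons_append, runsR, hl]
    by_cases h : d = c
    · subst h
      simp only [beq_self_eq_true, if_true, ih]
    · have hb : (d == c) = false := by simp [h]
      rw [hb]
      simp only [Bool.false_eq_true, if_false, ih d 1]
      split
      · rw [List.dropLast_cons_of_ne_nil (runsR_ne_nil d 1 rest)]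
        have : (n :: runsR d 1 rest).getLastD 0 = (runsR d 1 rest).getLastD 0 := by
          cases hr : runsR d 1 rest with
          | nil => exact absurd hr (runsR_ne_nil d 1 rest)
          | cons y t => simp
        rw [this]; simp
      · simp

theorem bBuild_eq (cs : List Char) (c : Char) (n : Nat) (acc : List Nat) (hn : n ≠ 0) :
    bBuild (some c) n acc cs = acc ++ runsR c n cs := by
  induction cs generalizing c n acc with
  | nil => simp [bBuild, runsR, hn]
  | cons d rest ih =>
    simp only [bBuild, runsR]
    by_cases h : d = c
    · subst h; simp [ih _ _ _ (Nat.succ_ne_zero n)]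
    · have hb : (some d == some c) = false := by simp [h]
      have hb2 : ((some c : Option Char) == some d) = false := by simp [Ne.symm h]
      rw [hb2]
      simp [hn, h, ih d 1 _ one_ne_zero]

theorem bBuild_top (l : List Char) :
    bBuild none 0 [] l = (match l with | [] => ([] : List Nat) | c :: cs => runsR c 1 cs) := by
  cases l with
  | nil => simp [bBuild]
  | cons c cs => simp [bBuild, bBuild_eq cs c 1 [] one_ne_zero]

theorem splitBy_loop_len (cs : List Char) (b : Char) (r : List Char) (acc : List (List Char)) :
    (List.splitBy.loop (· == ·) cs b r acc).map List.length =
      (acc.map List.length).reverse ++ runsR b (r.length + 1) cs := by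
  induction cs generalizing b r acc with
  | nil => simp [List.splitBy.loop, runsR]  -- base run
  | cons d rest ih =>
    simp only [List.splitBy.loop, runsR]
    by_cases h : b = d
    · subst h; simp [ih]
    · have hb : (b == d) = false := by simp [h]
      have hb2 : (d == b) = false := by simp [Ne.symm h]
      rw [hb, hb2]
      simp [ih]

theorem runsD_eq (s : String) (c : Char) (cs : List Char) (h : s.toList = c :: cs) :
    runsD s = (runsR c 1 cs).map (· % 3) := by
  have hlen : (List.splitBy (· == ·) (c :: cs)).map List.length = runsR c 1 cs := by
    simp [List.splitBy, splitBy_loop_len]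
  rw [runsD, h, ← hlen, List.map_map]
  rfl

-- closed form of the full run-list check
theorem check_eq (rs : List Nat) (flag : Bool) :
    check flag rs =
      (!rs.any (fun r => r % 3 == 1) &&
        ((rs.countP (fun r => r % 3 == 2) + (if flag then 1 else 0)) == 1)) := by
  induction rs generalizing flag with
  | nil => cases flag <;> simp [check]
  | cons r rest ih =>
    simp only [check, List.any_cons, List.countP_cons]
    have h3 : r % 3 = 0 ∨ r % 3 = 1 ∨ r % 3 = 2 := by omega
    rcases h3 with h | h | h <;> simp only [h] <;> cases flag <;>
      simp [ih, Nat.add_comm]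

theorem A_eq (s : String) (c : Char) (cs : List Char) (h : s.toList = c :: cs) :
    isDecomposable s = chk false (runsR c 1 (cs ++ ['$'])) := by
  simp only [isDecomposable, h, List.cons_append, List.drop_succ_cons, List.drop_zero]
  exact aLoop_eq_chk (cs ++ ['$']) c false 1

theorem B_eq (s : String) (c : Char) (cs : List Char) (h : s.toList = c :: cs) :
    isDecomposable_alt s =
      (!(runsR c 1 cs).any (fun r => r % 3 == 1) &&
        ((runsR c 1 cs).countP (fun r => r % 3 == 2) == 1)) := by
  simp only [isDecomposable_alt, h, bBuild_top]
  cases hany : (runsR c 1 cs).any (fun r => r % 3 == 1) <;> simp_all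

-- main case analysis for strings ending in '$': A checks only the initial runs
theorem main_dollar (init : List Nat) (r : Nat) :
    (check false init =
        (!(init ++ [r]).any (fun t => t % 3 == 1) &&
          ((init ++ [r]).countP (fun t => t % 3 == 2) == 1))
      ↔
      ¬((∀ t ∈ init, t % 3 ≠ 1) ∧
        (r % 3 = 1 ∧ init.countP (fun t => t % 3 == 2) = 1 ∨
         r % 3 = 2 ∧ init.countP (fun t => t % 3 == 2) ≤ 1))) := by
  rw [check_eq]
  by_cases ha : init.any (fun t => t % 3 == 1)
  · have h1 : ¬ (∀ t ∈ init, t % 3 ≠ 1) := by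
      simp only [List.any_eq_true, beq_iff_eq] at ha
      obtain ⟨t, ht, he⟩ := ha
      intro hall; exact hall t ht he
    simp [List.any_append, ha, h1]
  · have h1 : (∀ t ∈ init, t % 3 ≠ 1) := by
      intro t ht he
      exact ha (by simp only [List.any_eq_true, beq_iff_eq]; exact ⟨t, ht, he⟩)
    have h3 : r % 3 = 0 ∨ r % 3 = 1 ∨ r % 3 = 2 := by omega
    set m := init.countP (fun t => t % 3 == 2) with hm
    rcases h3 with h | h | h
    · rw [Bool.eq_iff_iff]
      simp [List.any_append, List.countP_append, ha, h]
      rw [hm]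
    · rw [Bool.eq_iff_iff]
      simp [List.any_append, List.countP_append, ha, h]
      exact Or.inl h1
    · rw [Bool.eq_iff_iff]
      simp [List.any_append, List.countP_append, ha, h]
      have hz : (∀ a ∈ init, ¬a % 3 = 2) ↔ m = 0 := by
        rw [hm, List.countP_eq_zero]; simp
      rw [hz]
      constructor
      · intro hiff _
        omega
      · intro himp
        have h2 := himp h1
        omega

theorem D_bridge (rs : List Nat) (hne : rs ≠ []) :
    (1 ≤ (rs.map (· % 3)).getLastD 0 ∧
     (rs.map (· % 3)).getLastD 0 + (rs.map (· % 3)).count 1 = 2 ∧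
     1 ≤ (rs.map (· % 3)).count 2 ∧
     (rs.map (· % 3)).count 2 ≤ (rs.map (· % 3)).getLastD 0)
    ↔ ((∀ t ∈ rs.dropLast, t % 3 ≠ 1) ∧
        (rs.getLast hne % 3 = 1 ∧ rs.dropLast.countP (fun t => t % 3 == 2) = 1 ∨
         rs.getLast hne % 3 = 2 ∧ rs.dropLast.countP (fun t => t % 3 == 2) ≤ 1)) := by
  obtain ⟨init, r, hsplit⟩ : ∃ init r, rs = init ++ [r] :=
    ⟨rs.dropLast, rs.getLast hne, (List.dropLast_append_getLast hne).symm⟩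
  subst hsplit
  have hz : init.countP (fun t => t % 3 == 1) = 0 ↔ (∀ t ∈ init, t % 3 ≠ 1) := by
    rw [List.countP_eq_zero]; simp
  have hc1 : ((init ++ [r]).map (· % 3)).count 1
      = init.countP (fun t => t % 3 == 1) + (if r % 3 = 1 then 1 else 0) := by
    simp [List.count_eq_countP, List.countP_map, List.countP_append]
    rfl
  have hc2 : ((init ++ [r]).map (· % 3)).count 2
      = init.countP (fun t => t % 3 == 2) + (if r % 3 = 2 then 1 else 0) := by
    simp [List.count_eq_countP, List.countP_map, List.countP_append]
    rfl
  have hg : ((init ++ [r]).map (· % 3)).getLastD 0 = r % 3 := by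
    simp [List.map_append]
  rw [hc1, hc2, hg, List.getLast_concat, List.dropLast_concat, ← hz]
  rcases (by omega : r % 3 = 0 ∨ r % 3 = 1 ∨ r % 3 = 2) with h | h | h
  · rw [h, if_neg (by omega), if_neg (by omega)]
    omega
  · rw [h, if_pos rfl, if_neg (by omega)]
    omega
  · rw [h, if_neg (by omega), if_pos rfl]
    omega

theorem dollar_iff (s : String) (c : Char) (cs : List Char) (h : s.toList = c :: cs)
    (hlast : (c :: cs).getLast (by simp) = '$') :
    (isDecomposable s = isDecomposable_alt s) ↔ ¬ D_isDecomposable s := by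
  have hne : runsR c 1 cs ≠ [] := runsR_ne_nil c 1 cs
  have hgd : (runsR c 1 cs).getLastD 0 = (runsR c 1 cs).getLast hne := by
    rw [List.getLastD_eq_getLast?, List.getLast?_eq_getLast hne]; rfl
  have hlast? : s.toList.getLast? = some '$' := by
    rw [h, List.getLast?_eq_getLast (l := c :: cs) (by simp), hlast]
  have hdec : (runsR c 1 cs).dropLast ++ [(runsR c 1 cs).getLast hne] = runsR c 1 cs :=
    List.dropLast_append_getLast hne
  have hDiff : D_isDecomposable s ↔
      ((∀ t ∈ (runsR c 1 cs).dropLast, t % 3 ≠ 1) ∧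
        ((runsR c 1 cs).getLast hne % 3 = 1 ∧
            (runsR c 1 cs).dropLast.countP (fun t => t % 3 == 2) = 1 ∨
         (runsR c 1 cs).getLast hne % 3 = 2 ∧
            (runsR c 1 cs).dropLast.countP (fun t => t % 3 == 2) ≤ 1)) := by
    unfold D_isDecomposable
    simp only [runsD_eq s c cs h, hlast?, true_and]
    exact D_bridge _ hne
  rw [A_eq s c cs h, B_eq s c cs h, runsR_sentinel]
  rw [if_pos hlast, hgd, chk_concat]
  rw [hDiff]
  have := main_dollar (runsR c 1 cs).dropLast ((runsR c 1 cs).getLast hne)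
  rw [hdec] at this
  exact this

theorem unchanged (s : String) : ¬ D_isDecomposable s → isDecomposable s = isDecomposable_alt s := by
  intro hnd
  cases h : s.toList with
  | nil =>
    have h1 : isDecomposable s = false := by
      simp [isDecomposable, h, aLoop]
    have h2 : isDecomposable_alt s = false := by
      simp [isDecomposable_alt, h, bBuild]
    rw [h1, h2]
  | cons c cs =>
    by_cases hlast : (c :: cs).getLast (by simp) = '$'
    · exact (dollar_iff s c cs h hlast).2 hnd
    · rw [A_eq s c cs h, B_eq s c cs h, runsR_sentinel, if_neg hlast, chk_concat, check_eq]
      simp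

-- ===== VERDICT (by name: the statement is the Claim_ definition above) =====
theorem isDecomposable_spec : Claim_unchanged_isDecomposable := by
  intro s _ hnd
  exact unchanged s hnd

theorem isDecomposable_changed : Claim_changed_isDecomposable := by
  unfold Claim_changed_isDecomposable; decide

theorem isDecomposable_tight : Claim_exact_isDecomposable := by
  intro s _ hd
  cases h : s.toList with
  | nil =>
    exfalso
    have := hd.1
    rw [h] at this
    simp at this
  | cons c cs =>
    have hlast : (c :: cs).getLast (by simp) = '$' := by
      have h1 := hd.1
      rw [h, List.getLast?_eq_getLast (l := c :: cs) (by simp)] at h1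
      exact Option.some_injective _ h1
    exact fun he => ((dollar_iff s c cs h hlast).1 he) hd
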